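-- pv_equiv track=rewrite | github.com/StormFusionOS/URL-Scrape-Bot | washdb-bot/seo_intelligence/jobs/analysis_jobs.py | estimate_volume_tier
-- ===== SOURCE A (Python) =====
-- from typing import Dict, List, Any, Optional
--
-- def estimate_volume_tier(keyword: str, serp_data: Dict) -> int:
--     """
--     Estimate volume tier (1-5) based on available signals.
--
--     Tier 1: Very low volume (long-tail, specific)
--     Tier 2: Low volume
--     Tier 3: Medium volume
--     Tier 4: High volume
--     Tier 5: Very high volume (generic terms)
--     """
--     word_count = len(keyword.split())
--     has_local = 'near me' in keyword.lower() or any(c.isupper() for c in keyword.split()[-1] if c.isalpha())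
--
--     # Longer keywords = lower volume
--     if word_count >= 5:
--         base_tier = 1
--     elif word_count >= 4:
--         base_tier = 2
--     elif word_count >= 3:
--         base_tier = 3
--     elif word_count >= 2:
--         base_tier = 4
--     else:
--         base_tier = 5
--
--     # Local intent reduces apparent volume
--     if has_local:
--         base_tier = max(1, base_tier - 1)
--
--     return base_tier
-- ===== SOURCE B (Python) =====
-- def estimate_volume_tier(keyword: str, serp_data) -> int:
--     """Tier by successive clamped decrements: start at 5 and walk the words
--     after the first, decrementing (floored at 1) once per word, then once
--     more for local intent. The word count is never computed."""
--     words = keyword.split()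
--     has_local = 'near me' in keyword.lower() or any(
--         c.isupper() for c in words[-1] if c.isalpha())
--     tier = 5
--     for _ in words[1:]:
--         tier = max(1, tier - 1)
--     if has_local:
--         tier = max(1, tier - 1)
--     return tier
-- ===== Notes on version B (the rewrite author's own statement) =====
-- stated objective: alternative
-- what changed: A maps a precomputed word count through a five-branch ladder and then applies a conditional clamped decrement; B never computes the word count: it starts at tier 5 and folds a clamped decrement over the words after the first, treating local intent as one more decrement of the same loop state. Pre_ excludes only whitespace-only keywords without 'near me', where both A and B raise IndexError.
import Mathlib
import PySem

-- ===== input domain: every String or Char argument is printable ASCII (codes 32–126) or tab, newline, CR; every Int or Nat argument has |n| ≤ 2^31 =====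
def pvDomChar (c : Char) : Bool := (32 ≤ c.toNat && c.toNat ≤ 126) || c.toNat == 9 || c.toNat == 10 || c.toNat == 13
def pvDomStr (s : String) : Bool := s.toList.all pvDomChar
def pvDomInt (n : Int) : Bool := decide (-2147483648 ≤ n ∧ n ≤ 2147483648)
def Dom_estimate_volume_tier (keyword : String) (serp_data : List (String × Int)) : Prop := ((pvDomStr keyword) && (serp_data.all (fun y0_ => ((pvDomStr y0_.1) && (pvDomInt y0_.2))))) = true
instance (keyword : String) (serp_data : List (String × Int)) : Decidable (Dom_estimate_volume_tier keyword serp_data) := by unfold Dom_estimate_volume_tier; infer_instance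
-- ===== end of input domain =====

-- B replaces A's word-count ladder + conditional decrement by a fold of clamped
-- decrements over the words after the first (objective: alternative decomposition);
-- serp_data is unused by both, as in the Python.

-- ===== PORT A =====
-- has_local = 'near me' in keyword.lower() or any(c.isupper() for c in keyword.split()[-1] if c.isalpha())
-- keyword.split()[-1] raises IndexError on an empty split (excluded by Pre_ when not
-- short-circuited); the getD "" default is never reached under Pre_.
def estimate_volume_tier (keyword : String) (serp_data : List (String × Int)) : Int :=
  let word_count : Int := (PySem.Str.split₀ keyword).length
  let has_local : Bool :=
    PySem.Str.isIn "near me" (PySem.Str.lower keyword) ||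
      ((((PySem.List.pyGet? (PySem.Str.split₀ keyword) (-1)).getD "").toList.filter
          PySem.Chars.isalpha).any PySem.Chars.isupper)
  let base_tier : Int :=
    if word_count ≥ 5 then 1
    else if word_count ≥ 4 then 2
    else if word_count ≥ 3 then 3
    else if word_count ≥ 2 then 4
    else 5
  let base_tier : Int := if has_local then max 1 (base_tier - 1) else base_tier
  base_tier

-- ===== PORT B =====
-- tier = 5; for _ in words[1:]: tier = max(1, tier-1); if has_local: one more decrement.
def estimate_volume_tier_alt (keyword : String) (serp_data : List (String × Int)) : Int :=
  let words := PySem.Str.split₀ keyword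
  let has_local : Bool :=
    PySem.Str.isIn "near me" (PySem.Str.lower keyword) ||
      ((((PySem.List.pyGet? words (-1)).getD "").toList.filter
          PySem.Chars.isalpha).any PySem.Chars.isupper)
  let tier : Int :=
    (PySem.List.slice words (some 1) none).foldl (fun t _ => max 1 (t - 1)) 5
  if has_local then max 1 (tier - 1) else tier

-- ===== PRECONDITION & SPEC =====
-- Pre_ excludes exactly the inputs where Python A raises IndexError: keyword splits to no
-- words and 'near me' does not short-circuit the or (B raises identically there).
def Pre_estimate_volume_tier (keyword : String) (serp_data : List (String × Int)) : Prop :=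
  PySem.Str.split₀ keyword ≠ [] ∨ PySem.Str.isIn "near me" (PySem.Str.lower keyword) = true
instance (keyword : String) (serp_data : List (String × Int)) : Decidable (Pre_estimate_volume_tier keyword serp_data) := by unfold Pre_estimate_volume_tier; infer_instance
def pvWitness_estimate_volume_tier : String × (List (String × Int)) := ("plumber near me", [("pos", 3)])

def Spec_estimate_volume_tier (keyword : String) (serp_data : List (String × Int)) (out : Int) : Prop := out = estimate_volume_tier_alt keyword serp_data
instance (keyword : String) (serp_data : List (String × Int)) (out : Int) : Decidable (Spec_estimate_volume_tier keyword serp_data out) := by unfold Spec_estimate_volume_tier; infer_instance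

-- ===== CLAIM =====
def Claim_equal_estimate_volume_tier : Prop := ∀ (keyword : String) (serp_data : List (String × Int)), Dom_estimate_volume_tier keyword serp_data → Pre_estimate_volume_tier keyword serp_data → Spec_estimate_volume_tier keyword serp_data (estimate_volume_tier keyword serp_data)

-- ===== LEMMAS AND PROOFS =====

-- Folding the clamped decrement over a list just subtracts its length, floored at 1.
theorem foldl_clamped_dec {α : Type} (l : List α) (t : Int) (ht : 1 ≤ t) :
    l.foldl (fun a _ => max 1 (a - 1)) t = max 1 (t - l.length) := by
  induction l generalizing t with
  | nil => simp; omega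
  | cons x xs ih =>
    simp only [List.foldl_cons, List.length_cons]
    rw [ih (max 1 (t - 1)) (le_max_left _ _)]
    push_cast; omega

-- ===== VERDICT =====
theorem estimate_volume_tier_spec : Claim_equal_estimate_volume_tier := by
  intro keyword serp_data _ _
  unfold Spec_estimate_volume_tier
  simp only [estimate_volume_tier, estimate_volume_tier_alt, PySem.List.slice_from_one,
      foldl_clamped_dec (PySem.Str.split₀ keyword).tail 5 (by norm_num)]
  cases h : (PySem.Str.isIn "near me" (PySem.Str.lower keyword) ||
      ((((PySem.List.pyGet? (PySem.Str.split₀ keyword) (-1)).getD "").toList.filter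
          PySem.Chars.isalpha).any PySem.Chars.isupper)) <;>
    simp only [List.length_tail] <;> split_ifs <;> push_cast <;> omega
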